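-- pv_equiv track=rewrite | github.com/pypi-data/pypi-mirror-107 | packages/percstat/percstat-0.0.0a4.tar.gz/percstat-0.0.0a4/percstat/percstat.py | AEB
-- ===== SOURCE A (Python) =====
-- def AEB(A,B):
-- 	n=0
-- 	for i in A[:]:
-- 		for j in B[:]:
-- 			if i == j:
-- 				n=n+1
-- 	if n == len(A) and len(A)>1:
-- 		return True
-- 	return False
-- ===== SOURCE B (Python) =====
-- def AEB(A, B):
--     ca = {}
--     for v in A:
--         ca[v] = ca.get(v, 0) + 1
--     cb = {}
--     for v in B:
--         cb[v] = cb.get(v, 0) + 1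
--     n = sum(c * cb.get(v, 0) for v, c in ca.items())
--     return n == len(A) and len(A) > 1
-- ===== Notes on version B (the rewrite author's own statement) =====
-- stated objective: faster
-- what changed: Replaces the nested all-pairs scan by two frequency dictionaries built in one pass each, summing countA(v)*countB(v) over the distinct values of A.
import Mathlib
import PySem

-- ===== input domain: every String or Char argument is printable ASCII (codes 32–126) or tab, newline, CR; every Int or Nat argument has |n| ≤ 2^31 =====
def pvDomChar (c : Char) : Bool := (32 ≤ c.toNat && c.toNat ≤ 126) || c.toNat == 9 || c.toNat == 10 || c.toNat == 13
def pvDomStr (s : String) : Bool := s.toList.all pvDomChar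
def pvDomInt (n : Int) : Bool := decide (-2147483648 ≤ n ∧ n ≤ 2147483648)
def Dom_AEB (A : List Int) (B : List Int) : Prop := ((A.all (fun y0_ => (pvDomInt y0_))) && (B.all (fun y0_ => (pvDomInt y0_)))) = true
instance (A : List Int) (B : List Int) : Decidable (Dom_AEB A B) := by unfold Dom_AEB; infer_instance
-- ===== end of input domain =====

-- B replaces A's nested all-pairs scan by two one-pass frequency dictionaries
-- (objective: faster — O(|A|+|B|) dict passes instead of O(|A|*|B|) comparisons).

-- ===== PORT A =====
-- for i in A[:]: for j in B[:]: if i == j: n += 1;  then n == len(A) and len(A) > 1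
def AEB (A : List Int) (B : List Int) : Bool :=
  let n : Int :=
    (PySem.List.slice A none none).foldl
      (fun n i =>
        (PySem.List.slice B none none).foldl
          (fun n j => if i == j then n + 1 else n) n)
      0
  if n = (A.length : Int) ∧ A.length > 1 then true else false

-- ===== PORT B =====
def AEB_alt (A : List Int) (B : List Int) : Bool :=
  let ca : PySem.Dict Int Int :=
    A.foldl (fun d v => d.insert v (d.getD v 0 + 1)) PySem.Dict.empty
  let cb : PySem.Dict Int Int :=
    B.foldl (fun d v => d.insert v (d.getD v 0 + 1)) PySem.Dict.empty
  let n : Int := (ca.items.map (fun p => p.2 * cb.getD p.1 0)).sum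
  decide (n = (A.length : Int) ∧ A.length > 1)

-- ===== PRECONDITION & SPEC =====
def Spec_AEB (A : List Int) (B : List Int) (out : Bool) : Prop := out = AEB_alt A B
instance (A : List Int) (B : List Int) (out : Bool) : Decidable (Spec_AEB A B out) := by unfold Spec_AEB; infer_instance

-- ===== CLAIM (what is proved, stated in full; the proofs are below) =====
def Claim_equal_AEB : Prop := ∀ (A : List Int) (B : List Int), Dom_AEB A B → Spec_AEB A B (AEB A B)

-- ===== LEMMAS AND PROOFS =====

-- grouping: summing f over A equals summing (count of v in A) * f v over A's distinct values
theorem AEB_grouped_sum (A : List Int) (f : Int → Int) :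
    ((PySem.Set.ofList A).map (fun k => (A.count k : Int) * f k)).sum = (A.map f).sum := by
  have hperm : (PySem.Set.ofList A).Perm A.dedup :=
    (List.perm_ext_iff_of_nodup (PySem.Set.nodup_ofList A) A.nodup_dedup).mpr
      (by intro a; simp [PySem.Set.mem_ofList])
  rw [(hperm.map _).sum_eq,
      ← List.sum_toFinset (fun k => (A.count k : Int) * f k) A.nodup_dedup]
  have h : A.dedup.toFinset = A.toFinset := by ext a; simp
  rw [h, Finset.sum_list_map_count A f]
  simp

-- A's nested loop computes the sum over i ∈ A of (count of i in B)
theorem AEB_loop_eq (A B : List Int) :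
    A.foldl (fun n i => B.foldl (fun n j => if i == j then n + 1 else n) n) (0 : Int)
      = (A.map (fun i => (B.count i : Int))).sum := by
  have hin : ∀ (i : Int) (a : Int),
      B.foldl (fun n j => if i == j then n + 1 else n) a = a + (B.count i : Int) := by
    intro i a
    rw [PySem.List.foldl_count_if (fun j => i == j) B a]
    simp only [List.count]
    have hpe : (fun j => i == j) = (fun x => x == i) := by
      funext j; by_cases h : i = j <;> simp [h, Ne.symm]
    rw [hpe]
  calc A.foldl (fun n i => B.foldl (fun n j => if i == j then n + 1 else n) n) (0 : Int)
      = A.foldl (fun n i => n + (B.count i : Int)) 0 := by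
        exact PySem.List.foldl_congr_mem A _ _ 0 (fun n i _ => hin i n)
    _ = (A.map (fun i => (B.count i : Int))).sum := by
        rw [PySem.List.foldl_add]; simp

-- ===== VERDICT (by name: the statement is the Claim_ definition above) =====
theorem AEB_spec : Claim_equal_AEB := by
  intro A B _
  unfold Spec_AEB AEB AEB_alt
  simp only [PySem.List.slice_none_none, PySem.Dict.foldl_insert_getD_add_one_eq_counter,
    PySem.Dict.items_counter, List.map_map, AEB_loop_eq]
  have hn : ((PySem.Set.ofList A).map
      ((fun p : Int × Int => p.2 * (PySem.Dict.counter B).getD p.1 0) ∘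
        fun k => (k, (A.count k : Int)))).sum
      = (A.map (fun i => (B.count i : Int))).sum := by
    rw [← AEB_grouped_sum A (fun i => (B.count i : Int))]
    apply congrArg
    apply List.map_congr_left
    intro k _
    simp [PySem.Dict.getD_counter]
  rw [hn]
  by_cases h : (A.map (fun i => (B.count i : Int))).sum = (A.length : Int) ∧ A.length > 1 <;>
    simp [h]
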